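-- pv_equiv track=rewrite | github.com/fedorkriuk/the-hook-lab | analyzer.py | _prepare_trends_summary
-- ===== SOURCE A (Python) =====
-- from typing import List, Dict, Any, Optional, Tuple
--
-- def _prepare_trends_summary(trends_data: List[Dict], max_items: int = 30) -> str:
--     """Prepare a concise summary of trends data for analysis."""
--     if not trends_data:
--         return "No trends data available."
--
--     # Group by source and get top items
--     summary_parts = []
--     sources = {}
--
--     for trend in trends_data[:max_items]:
--         source = trend.get('source', 'unknown')
--         if source not in sources:
--             sources[source] = []
--         sources[source].append(trend)
--
--     for source, source_trends in sources.items():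
--         summary_parts.append(f"\n{source.upper()}:")
--         for i, trend in enumerate(source_trends[:10], 1):  # Top 10 per source
--             topic = trend.get('topic', 'Unknown')
--             content = trend.get('content', '')[:100]  # Limit content length
--             engagement = trend.get('engagement_score', 0)
--             summary_parts.append(f"{i}. {topic} (Score: {engagement}): {content}...")
--
--     return '\n'.join(summary_parts)
-- ===== SOURCE B (Python) =====
-- from typing import List, Dict, Any, Optional, Tuple
--
-- def _prepare_trends_summary(trends_data: List[Dict], max_items: int = 30) -> str:
--     """Prepare a concise summary of trends data for analysis."""
--     if not trends_data:
--         return "No trends data available."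
--
--     items = trends_data[:max_items]
--     # Distinct sources in first-appearance order; then one filtering pass per source.
--     order = list(dict.fromkeys(t.get('source', 'unknown') for t in items))
--     lines = []
--     for source in order:
--         group = [t for t in items if t.get('source', 'unknown') == source][:10]
--         lines.append(f"\n{source.upper()}:")
--         lines.extend(
--             f"{i}. {t.get('topic', 'Unknown')} (Score: {t.get('engagement_score', 0)}): {t.get('content', '')[:100]}..."
--             for i, t in enumerate(group, 1))
--     return '\n'.join(lines)
-- ===== Notes on version B (the rewrite author's own statement) =====
-- stated objective: alternative
-- what changed: Replaces A's dict-of-lists grouping (one pass building sources[source].append(trend), then iterating .items()) with a dedup of sources in first-appearance order followed by one filtering pass per distinct source.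
import Mathlib
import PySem

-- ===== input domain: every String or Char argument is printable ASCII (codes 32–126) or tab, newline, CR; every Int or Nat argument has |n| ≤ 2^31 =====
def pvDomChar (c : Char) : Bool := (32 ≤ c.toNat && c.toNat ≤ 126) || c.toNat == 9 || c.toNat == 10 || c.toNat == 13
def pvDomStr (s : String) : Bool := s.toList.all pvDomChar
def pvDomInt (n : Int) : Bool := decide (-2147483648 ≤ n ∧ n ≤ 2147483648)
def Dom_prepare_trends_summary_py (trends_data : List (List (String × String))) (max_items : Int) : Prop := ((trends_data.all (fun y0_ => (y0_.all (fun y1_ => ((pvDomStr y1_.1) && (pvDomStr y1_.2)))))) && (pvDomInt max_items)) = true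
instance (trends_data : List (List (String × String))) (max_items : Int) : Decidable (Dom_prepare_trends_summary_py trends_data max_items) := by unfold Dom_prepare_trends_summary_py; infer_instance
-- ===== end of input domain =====

-- B replaces A's dict-of-lists grouping with an ordered dedup of sources followed by one
-- filtering pass per distinct source (alternative decomposition, same observable output).
-- ===== PORT A =====
-- Python dict .get(k, default): first-match lookup in the association list.
def pvTrendGet (t : List (String × String)) (k d : String) : String :=
  ((PySem.Dict.mk t).get? k).getD d

-- literal port of A: group trends by source in an insertion-ordered dict, then walk .items()
def prepare_trends_summary_py (trends_data : List (List (String × String))) (max_items : Int) : String :=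
  if trends_data = [] then "No trends data available."
  else
    let sources : PySem.Dict String (List (List (String × String))) :=
      (PySem.List.slice trends_data none (some max_items)).foldl
        (fun sources trend =>
          let source := pvTrendGet trend "source" "unknown"
          let sources := if sources.contains source then sources else sources.insert source []
          sources.modify source [] (fun l => l ++ [trend]))
        PySem.Dict.empty
    let summary_parts : List String :=
      sources.items.foldl
        (fun parts p =>
          let parts := parts ++ ["\n" ++ PySem.Str.upper p.1 ++ ":"]
          (PySem.List.enumerate (PySem.List.slice p.2 none (some 10)) 1).foldl
            (fun parts it =>
              let topic := pvTrendGet it.2 "topic" "Unknown"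
              -- engagement default 0 renders as "0" through the f-string
              let content := PySem.Str.slice (pvTrendGet it.2 "content" "") none (some 100)
              let engagement := pvTrendGet it.2 "engagement_score" "0"
              parts ++ [PySem.Int.toStr it.1 ++ ". " ++ topic ++ " (Score: " ++ engagement ++ "): " ++ content ++ "..."])
            parts)
        []
    PySem.Str.join "\n" summary_parts

-- ===== PORT B =====
-- port of B: distinct sources in first-appearance order, then one filtering pass per source
def prepare_trends_summary_py_alt (trends_data : List (List (String × String))) (max_items : Int) : String :=
  if trends_data = [] then "No trends data available."
  else
    let items := PySem.List.slice trends_data none (some max_items)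
    let order := PySem.List.dedup (items.map (fun t => pvTrendGet t "source" "unknown"))
    let lines := order.foldl
      (fun lines source =>
        let group := PySem.List.slice
          (items.filter (fun t => pvTrendGet t "source" "unknown" == source)) none (some 10)
        (lines ++ ["\n" ++ PySem.Str.upper source ++ ":"]) ++
          (PySem.List.enumerate group 1).map (fun it =>
            PySem.Int.toStr it.1 ++ ". " ++ pvTrendGet it.2 "topic" "Unknown" ++ " (Score: " ++
              pvTrendGet it.2 "engagement_score" "0" ++ "): " ++
              PySem.Str.slice (pvTrendGet it.2 "content" "") none (some 100) ++ "..."))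
      []
    PySem.Str.join "\n" lines

-- ===== PRECONDITION & SPEC =====
def Spec_prepare_trends_summary_py (trends_data : List (List (String × String))) (max_items : Int) (out : String) : Prop := out = prepare_trends_summary_py_alt trends_data max_items
instance (trends_data : List (List (String × String))) (max_items : Int) (out : String) : Decidable (Spec_prepare_trends_summary_py trends_data max_items out) := by unfold Spec_prepare_trends_summary_py; infer_instance

-- ===== CLAIM (what is proved, stated in full; the proofs are below) =====
def Claim_equal_prepare_trends_summary_py : Prop := ∀ (trends_data : List (List (String × String))) (max_items : Int), Dom_prepare_trends_summary_py trends_data max_items → Spec_prepare_trends_summary_py trends_data max_items (prepare_trends_summary_py trends_data max_items)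

-- ===== LEMMAS AND PROOFS =====

-- A's "if source not in sources: sources[source] = []; sources[source].append(trend)" is one Dict.modify
theorem pv_step_eq (d : PySem.Dict String (List (List (String × String)))) (s : String)
    (t : List (String × String)) :
    (if d.contains s then d else d.insert s []).modify s [] (fun l => l ++ [t]) =
      d.modify s [] (fun l => l ++ [t]) := by
  by_cases h : d.contains s
  · simp [h]
  · have hc : d.contains s = false := by simpa using h
    simp only [hc, Bool.false_eq_true, ite_false, PySem.Dict.modify,
      PySem.Dict.getD_insert_self, PySem.Dict.insert_insert_self]
    rw [PySem.Dict.getD_of_not_contains d [] hc]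

-- the grouping dict A builds, characterised: its items are the distinct sources in
-- first-appearance order, each paired with the filtered sub-list
theorem pv_sources_items (items : List (List (String × String))) :
    (items.foldl
        (fun sources trend =>
          let source := pvTrendGet trend "source" "unknown"
          let sources := if sources.contains source then sources else sources.insert source []
          sources.modify source [] (fun l => l ++ [trend]))
        PySem.Dict.empty).items =
      (PySem.List.dedup (items.map (fun t => pvTrendGet t "source" "unknown"))).map
        (fun s => (s, items.filter (fun t => pvTrendGet t "source" "unknown" == s))) := by
  have hbody : (fun (sources : PySem.Dict String (List (List (String × String)))) trend =>
        let source := pvTrendGet trend "source" "unknown"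
        let sources := if sources.contains source then sources else sources.insert source []
        sources.modify source [] (fun l => l ++ [trend])) =
      (fun d t => d.modify (pvTrendGet t "source" "unknown") []
        ((fun (_ : PySem.Dict String (List (List (String × String)))) (t : List (String × String))
            (l : List (List (String × String))) => l ++ [t]) d t)) := by
    funext d t
    exact pv_step_eq d (pvTrendGet t "source" "unknown") t
  rw [hbody]
  have hkeys := PySem.Dict.keys_foldl_modify_key items
    (fun t => pvTrendGet t "source" "unknown") []
    (fun _ t l => l ++ [t]) PySem.Dict.empty
  have hnd := PySem.Dict.nodup_keys_foldl_modify_key items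
    (fun t => pvTrendGet t "source" "unknown") []
    (fun _ t l => l ++ [t]) PySem.Dict.empty PySem.Dict.nodup_keys_empty
  rw [PySem.Dict.items_eq_map_keys _ hnd []]
  rw [hkeys, PySem.Dict.keys_empty]
  have hupd : PySem.Set.update ([] : List String)
      (items.map (fun t => pvTrendGet t "source" "unknown")) =
      PySem.List.dedup (items.map (fun t => pvTrendGet t "source" "unknown")) := by
    rw [PySem.List.dedup_eq_ofList, ← PySem.Set.ofList_nil, ← PySem.Set.ofList_append,
      List.nil_append]
  rw [hupd]
  refine List.map_congr_left (fun s _ => ?_)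
  have hfold : (items.foldl (fun d t => d.modify (pvTrendGet t "source" "unknown") []
        ((fun _ t l => l ++ [t]) d t)) PySem.Dict.empty) =
      ((items.map (fun t => (pvTrendGet t "source" "unknown", t))).foldl
        (fun d p => d.modify p.1 [] (fun l => l ++ [p.2])) PySem.Dict.empty) := by
    rw [List.foldl_map]
  rw [hfold, PySem.Dict.getD_foldl_modify_append, PySem.Dict.getD_empty, List.nil_append,
    List.filter_map, List.map_map]
  simp [Function.comp_def]

-- ===== VERDICT (by name: the statement is the Claim_ definition above) =====
theorem prepare_trends_summary_py_spec : Claim_equal_prepare_trends_summary_py := by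
  intro td m _
  unfold Spec_prepare_trends_summary_py prepare_trends_summary_py prepare_trends_summary_py_alt
  by_cases h : td = []
  · simp [h]
  · simp only [if_neg h]
    congr 1
    rw [pv_sources_items]
    -- A's outer loop, flattened
    have hA : ∀ (ps : List (String × List (List (String × String)))) (acc : List String),
        ps.foldl
          (fun parts p =>
            (PySem.List.enumerate (PySem.List.slice p.2 none (some 10)) 1).foldl
              (fun parts it =>
                parts ++ [PySem.Int.toStr it.1 ++ ". " ++ pvTrendGet it.2 "topic" "Unknown" ++
                  " (Score: " ++ pvTrendGet it.2 "engagement_score" "0" ++ "): " ++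
                  PySem.Str.slice (pvTrendGet it.2 "content" "") none (some 100) ++ "..."])
              (parts ++ ["\n" ++ PySem.Str.upper p.1 ++ ":"])) acc =
        acc ++ ps.flatMap (fun p =>
          ("\n" ++ PySem.Str.upper p.1 ++ ":") ::
            (PySem.List.enumerate (PySem.List.slice p.2 none (some 10)) 1).map
              (fun it =>
                PySem.Int.toStr it.1 ++ ". " ++ pvTrendGet it.2 "topic" "Unknown" ++ " (Score: " ++
                  pvTrendGet it.2 "engagement_score" "0" ++ "): " ++
                  PySem.Str.slice (pvTrendGet it.2 "content" "") none (some 100) ++ "...")) := by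
      intro ps
      induction ps with
      | nil => intro acc; simp
      | cons p rest ih =>
          intro acc
          rw [List.foldl_cons, PySem.List.foldl_append_singleton_eq_map, ih]
          simp
    -- B's loop, flattened
    have hB : ∀ (order : List String) (acc : List String),
        order.foldl (fun lines source =>
          (lines ++ ["\n" ++ PySem.Str.upper source ++ ":"]) ++
            (PySem.List.enumerate (PySem.List.slice
              ((PySem.List.slice td none (some m)).filter
                (fun t => pvTrendGet t "source" "unknown" == source)) none (some 10)) 1).map
              (fun it =>
                PySem.Int.toStr it.1 ++ ". " ++ pvTrendGet it.2 "topic" "Unknown" ++ " (Score: " ++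
                  pvTrendGet it.2 "engagement_score" "0" ++ "): " ++
                  PySem.Str.slice (pvTrendGet it.2 "content" "") none (some 100) ++ "...")) acc =
        acc ++ order.flatMap (fun s =>
          ("\n" ++ PySem.Str.upper s ++ ":") ::
            (PySem.List.enumerate (PySem.List.slice
              ((PySem.List.slice td none (some m)).filter
                (fun t => pvTrendGet t "source" "unknown" == s)) none (some 10)) 1).map
              (fun it =>
                PySem.Int.toStr it.1 ++ ". " ++ pvTrendGet it.2 "topic" "Unknown" ++ " (Score: " ++
                  pvTrendGet it.2 "engagement_score" "0" ++ "): " ++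
                  PySem.Str.slice (pvTrendGet it.2 "content" "") none (some 100) ++ "...")) := by
      intro order
      induction order with
      | nil => intro acc; simp
      | cons s rest ih =>
          intro acc
          rw [List.foldl_cons, ih]
          simp
    rw [hA, hB, List.flatMap_map]
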